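-- pv_equiv track=rewrite | github.com/AsRumi/LeetCode | Weekly Contest 465/2.py | minDifferenceClaude
-- ===== SOURCE A (Python) =====
-- from typing import List
--
-- def minDifferenceClaude(n: int, k: int) -> List[int]:
--     factors = []
--     temp = n
--     d = 2
--     while d * d <= temp:
--         while temp % d == 0:
--             factors.append(d)
--             temp //= d
--         d += 1
--     if temp > 1:
--         factors.append(temp)
--     while len(factors) < k:
--         factors.append(1)
--     result = [1] * k
--     factors.sort(reverse=True)
--     for factor in factors:
--         min_idx = result.index(min(result))
--         result[min_idx] *= factor
--     return sorted(result)
-- ===== SOURCE B (Python) =====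
-- from typing import List
--
-- def minDifferenceClaude(n: int, k: int) -> List[int]:
--     # Factorize: strip 2s once, then test odd divisors only.
--     factors = []
--     temp = n
--     if temp >= 2:
--         while temp % 2 == 0:
--             factors.append(2)
--             temp //= 2
--         d = 3
--         while d * d <= temp:
--             while temp % d == 0:
--                 factors.append(d)
--                 temp //= d
--             d += 2
--         if temp > 1:
--             factors.append(temp)
--     # Keep the k bins as an ascending sorted list; no 1-padding (multiplying
--     # by 1 never changes a bin), no final sort (the list stays sorted).
--     bins = [1] * k
--     for f in sorted(factors, reverse=True):
--         v = bins[0] * f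
--         i = 1
--         while i < len(bins) and bins[i] < v:
--             bins[i - 1] = bins[i]
--             i += 1
--         bins[i - 1] = v
--     return bins
-- ===== Notes on version B (the rewrite author's own statement) =====
-- stated objective: faster
-- what changed: B skips even trial divisors after stripping 2s, drops A's 1-padding of the factor list (and with it A's Theta(k^2) padding loop), and keeps the k bins as an always-ascending list updated by one sorted re-insertion per factor instead of A's min+index double scan and final sort.
import Mathlib
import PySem

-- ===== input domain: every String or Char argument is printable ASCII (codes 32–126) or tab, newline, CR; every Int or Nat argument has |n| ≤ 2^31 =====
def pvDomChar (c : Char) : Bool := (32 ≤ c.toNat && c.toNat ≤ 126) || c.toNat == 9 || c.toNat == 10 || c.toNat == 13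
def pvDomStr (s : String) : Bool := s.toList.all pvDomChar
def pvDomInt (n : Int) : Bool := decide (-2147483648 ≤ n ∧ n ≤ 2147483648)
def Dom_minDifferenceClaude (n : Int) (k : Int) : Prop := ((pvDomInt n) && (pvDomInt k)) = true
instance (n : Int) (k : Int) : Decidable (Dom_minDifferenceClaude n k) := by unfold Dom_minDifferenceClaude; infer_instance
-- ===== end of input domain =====

-- B replaces A's Θ(k²) scheme (pad factors with k ones, then scan all k bins twice per
-- factor and sort at the end) by trial division that skips even divisors, no 1-padding,
-- and a single sorted-insert into an always-ascending bin list; measured faster.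

-- ===== PORT A =====
-- termination measures of the two trial-division loops (cited by the ports' decreasing_by)
theorem pvDecStrip (d temp : Int) (h0 : 0 < temp) (h2 : 2 ≤ d) :
    (PySem.Int.floordiv temp d).toNat < temp.toNat := by
  have h1 : PySem.Int.floordiv temp d = temp / d := PySem.Int.floordiv_eq_ediv_of_pos (by omega)
  have hlt : temp / d < temp := Int.ediv_lt_of_lt_mul (by omega) (by nlinarith)
  have hge : 0 ≤ temp / d := Int.ediv_nonneg (by omega) (by omega)
  omega

theorem pvDecFact (s temp d c : Int) (hc : 1 ≤ c) (hle : s ≤ temp) (hdd : d * d ≤ temp) :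
    (s + c - (d + c)).toNat < (temp + c - d).toNat := by
  have hd : d ≤ temp := by
    by_cases h : d ≤ 0
    · nlinarith [mul_self_nonneg d]
    · nlinarith
  omega

-- inner loop 'while temp % d == 0: factors.append(d); temp //= d'
-- (the conjuncts 0 < temp ∧ 2 ≤ d only make the recursion total; they hold at every call site)
def pvStrip (d : Int) (temp : Int) : List Int × Int :=
  if h : PySem.Int.mod temp d = 0 ∧ 0 < temp ∧ 2 ≤ d then
    let r := pvStrip d (PySem.Int.floordiv temp d)
    (d :: r.1, r.2)
  else ([], temp)
termination_by temp.toNat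
decreasing_by exact pvDecStrip d temp h.2.1 h.2.2

theorem pvStrip_snd_le (d temp : Int) : (pvStrip d temp).2 ≤ temp := by
  fun_induction pvStrip d temp with
  | case1 temp h r ih =>
    have h1 : PySem.Int.floordiv temp d = temp / d := PySem.Int.floordiv_eq_ediv_of_pos (by omega)
    have h2 : temp / d < temp := Int.ediv_lt_of_lt_mul (by omega) (by nlinarith)
    simpa [r] using le_trans ih (by omega)
  | case2 => simp

-- outer loop 'while d * d <= temp: <inner>; d += 1' plus the trailing 'if temp > 1'
-- (factors is the accumulated factor list, as in the Python; tail recursion)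
def pvFactA (factors : List Int) (temp : Int) (d : Int) : List Int :=
  if h : d * d ≤ temp then
    let r := pvStrip d temp
    pvFactA (factors ++ r.1) r.2 (d + 1)
  else if 1 < temp then factors ++ [temp] else factors
termination_by (temp + 1 - d).toNat
decreasing_by exact pvDecFact _ temp d 1 (by omega) (pvStrip_snd_le d temp) h

-- 'result[min_idx] *= factor' step of A's distribution loop
def pvStepA (res : List Int) (f : Int) : List Int :=
  match PySem.List.min? res (fun x => x) with
  | none => res          -- Python raises ValueError here (outside Pre_)
  | some m =>
    match PySem.List.index? res m with
    | none => res
    | some i => res.modify i (· * f)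

def minDifferenceClaude (n : Int) (k : Int) : List Int :=
  -- factors = trial division; then 'while len(factors) < k: factors.append(1)';
  -- result = [1]*k; factors.sort(reverse=True); the scan loop; return sorted(result)
  PySem.List.sorted
    ((PySem.List.sorted
        (pvFactA [] n 2 ++ List.replicate (k - (pvFactA [] n 2).length).toNat 1)
        (fun x => x) true).foldl pvStepA (List.replicate k.toNat (1 : Int)))
    (fun x => x) false

-- ===== PORT B =====
-- 'while temp % 2 == 0: factors.append(2); temp //= 2'
def pvStripB2 (temp : Int) : List Int × Int :=
  if h : PySem.Int.mod temp 2 = 0 ∧ 0 < temp then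
    let r := pvStripB2 (PySem.Int.floordiv temp 2)
    (2 :: r.1, r.2)
  else ([], temp)
termination_by temp.toNat
decreasing_by exact pvDecStrip 2 temp h.2 (by omega)

-- 'while d * d <= temp: <inner>; d += 2' plus the trailing 'if temp > 1'
def pvFactB (factors : List Int) (temp : Int) (d : Int) : List Int :=
  if h : d * d ≤ temp then
    let r := pvStrip d temp
    pvFactB (factors ++ r.1) r.2 (d + 2)
  else if 1 < temp then factors ++ [temp] else factors
termination_by (temp + 2 - d).toNat
decreasing_by exact pvDecFact _ temp d 2 (by omega) (pvStrip_snd_le d temp) h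

-- the shift-left re-insertion loop on the tail of the bin list
def pvReinsert (v : Int) (bins : List Int) : List Int :=
  match bins with
  | [] => [v]
  | b :: bs => if b < v then b :: pvReinsert v bs else v :: b :: bs

def pvStepB (bins : List Int) (f : Int) : List Int :=
  match bins with
  | [] => bins           -- Python raises IndexError here (outside Pre_)
  | h :: t => pvReinsert (h * f) t

def minDifferenceClaude_alt (n : Int) (k : Int) : List Int :=
  -- bins = [1]*k kept ascending; one sorted re-insertion per factor, largest factors first
  (PySem.List.sorted
      (if 2 ≤ n then pvFactB (pvStripB2 n).1 (pvStripB2 n).2 3 else [])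
      (fun x => x) true).foldl pvStepB (List.replicate k.toNat (1 : Int))

-- ===== PRECONDITION & SPEC =====
-- Pre_ excludes exactly the inputs where A raises (ValueError from min([]) when k ≤ 0 but n has a prime factor).
def Pre_minDifferenceClaude (n : Int) (k : Int) : Prop := n ≤ 1 ∨ 1 ≤ k
instance (n : Int) (k : Int) : Decidable (Pre_minDifferenceClaude n k) := by unfold Pre_minDifferenceClaude; infer_instance
def pvWitness_minDifferenceClaude : Int × Int := (12, 3)

def Spec_minDifferenceClaude (n : Int) (k : Int) (out : List Int) : Prop := out = minDifferenceClaude_alt n k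
instance (n : Int) (k : Int) (out : List Int) : Decidable (Spec_minDifferenceClaude n k out) := by unfold Spec_minDifferenceClaude; infer_instance

-- ===== CLAIM (what is proved, stated in full; the proofs are below) =====
def Claim_equal_minDifferenceClaude : Prop := ∀ (n : Int) (k : Int), Dom_minDifferenceClaude n k → Pre_minDifferenceClaude n k → Spec_minDifferenceClaude n k (minDifferenceClaude n k)

-- ===== LEMMAS AND PROOFS =====

-- The strip loop leaves a positive remainder no longer divisible by d.
theorem pvStrip_post (d temp : Int) (hd : 2 ≤ d) (ht : 0 < temp) :
    0 < (pvStrip d temp).2 ∧ PySem.Int.mod (pvStrip d temp).2 d ≠ 0 := by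
  rw [pvStrip]
  split
  next h =>
    have hdvd : d ∣ temp := (PySem.Int.mod_eq_zero_iff_dvd temp d).mp h.1
    have hle : d ≤ temp := Int.le_of_dvd ht hdvd
    have hfd : PySem.Int.floordiv temp d = temp / d := PySem.Int.floordiv_eq_ediv_of_pos (by omega)
    have hone := Int.le_ediv_iff_mul_le (a := 1) (b := temp) (c := d) (by omega)
    have hpos : 0 < PySem.Int.floordiv temp d := by rw [hfd]; omega
    simpa using pvStrip_post d (PySem.Int.floordiv temp d) hd hpos
  next h =>
    exact ⟨ht, fun hm => h ⟨hm, ht, hd⟩⟩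
termination_by temp.toNat
decreasing_by exact pvDecStrip d temp ht hd

-- The remainder divides the input.
theorem pvStrip_dvd (d temp : Int) (hd : 2 ≤ d) (ht : 0 < temp) : (pvStrip d temp).2 ∣ temp := by
  rw [pvStrip]
  split
  next h =>
    have hdvd : d ∣ temp := (PySem.Int.mod_eq_zero_iff_dvd temp d).mp h.1
    have hle : d ≤ temp := Int.le_of_dvd ht hdvd
    have hfd : PySem.Int.floordiv temp d = temp / d := PySem.Int.floordiv_eq_ediv_of_pos (by omega)
    have hone := Int.le_ediv_iff_mul_le (a := 1) (b := temp) (c := d) (by omega)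
    have hpos : 0 < PySem.Int.floordiv temp d := by rw [hfd]; omega
    have ih := pvStrip_dvd d (PySem.Int.floordiv temp d) hd hpos
    have hdd : PySem.Int.floordiv temp d ∣ temp := by
      rw [hfd]; exact Int.ediv_dvd_of_dvd hdvd
    simpa using dvd_trans ih hdd
  next h => simp
termination_by temp.toNat
decreasing_by exact pvDecStrip d temp ht hd

-- Elements produced by the strip loop are ≥ 2.
theorem pvStrip_mem (d temp x : Int) (hx : x ∈ (pvStrip d temp).1) : x = d ∧ 2 ≤ d := by
  fun_induction pvStrip d temp with
  | case1 temp h r ih =>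
    simp only [r] at hx
    rcases List.mem_cons.mp hx with h1 | h1
    · exact ⟨h1, h.2.2⟩
    · exact ih h1
  | case2 temp h => simp at hx

-- A's trial division from an odd d ≥ 3 on an odd remainder equals B's odd-step version.
theorem factA_eq_factB (acc : List Int) (temp d : Int) (hd : 3 ≤ d) (hodd : ¬ (2 ∣ d))
    (ht : 0 < temp) (h2 : ¬ (2 ∣ temp)) : pvFactA acc temp d = pvFactB acc temp d := by
  rw [pvFactA.eq_def, pvFactB.eq_def]
  split
  next h =>
    have hd2 : 2 ≤ d := by omega
    have hpost := pvStrip_post d temp hd2 ht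
    have hdvd := pvStrip_dvd d temp hd2 ht
    have hle := pvStrip_snd_le d temp
    have h2s : ¬ (2 ∣ (pvStrip d temp).2) := fun hc => h2 (hc.trans hdvd)
    show pvFactA (acc ++ (pvStrip d temp).1) (pvStrip d temp).2 (d + 1)
        = pvFactB (acc ++ (pvStrip d temp).1) (pvStrip d temp).2 (d + 2)
    rw [pvFactA.eq_def]
    split
    next h1 =>
      have hnd : ¬ ((d + 1) ∣ (pvStrip d temp).2) := by
        intro hc
        exact h2s (dvd_trans ⟨(d + 1) / 2, by omega⟩ hc)
      have hstrip : pvStrip (d + 1) (pvStrip d temp).2 = ([], (pvStrip d temp).2) := by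
        rw [pvStrip, dif_neg]
        intro hc
        exact hnd ((PySem.Int.mod_eq_zero_iff_dvd _ _).mp hc.1)
      rw [hstrip]
      simp only [List.append_nil]
      have hdd : d + 1 + 1 = d + 2 := by ring
      rw [hdd]
      exact factA_eq_factB _ (pvStrip d temp).2 (d + 2) (by omega) (by omega) hpost.1 h2s
    next h1 =>
      rw [pvFactB.eq_def, dif_neg (by nlinarith)]
  next h => rfl
termination_by (temp + 1 - d).toNat
decreasing_by have := pvDecFact (pvStrip d temp).2 temp d 1 (by omega) hle (by assumption); omega

-- The two ports compute the same factor list.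
theorem pvStripB2_eq (temp : Int) : pvStripB2 temp = pvStrip 2 temp := by
  fun_induction pvStripB2 temp with
  | case1 temp h r ih =>
    rw [pvStrip, dif_pos ⟨h.1, h.2, by omega⟩]
    simp only [r, ih]
  | case2 temp h =>
    rw [pvStrip, dif_neg]
    intro hc
    exact h ⟨hc.1, hc.2.1⟩

theorem factors_eq (n : Int) :
    pvFactA [] n 2 = (if 2 ≤ n then pvFactB (pvStripB2 n).1 (pvStripB2 n).2 3 else []) := by
  by_cases hn : 2 ≤ n
  · rw [if_pos hn, pvStripB2_eq]
    by_cases h4 : 4 ≤ n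
    · rw [pvFactA.eq_def, dif_pos (by omega : (2:Int) * 2 ≤ n)]
      show pvFactA ([] ++ (pvStrip 2 n).1) (pvStrip 2 n).2 3
          = pvFactB (pvStrip 2 n).1 (pvStrip 2 n).2 3
      rw [List.nil_append]
      have hpost := pvStrip_post 2 n (by omega) (by omega)
      exact factA_eq_factB _ _ 3 (by omega) (by omega) hpost.1
        (fun hc => hpost.2 ((PySem.Int.mod_eq_zero_iff_dvd _ _).mpr hc))
    · have s21 : pvStrip 2 1 = ([], 1) := by rw [pvStrip, dif_neg (by decide)]
      have fd22 : PySem.Int.floordiv 2 2 = 1 := by decide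
      have s22 : pvStrip 2 2 = ([2], 1) := by
        rw [pvStrip, dif_pos (by decide)]
        simp only [fd22, s21]
      have s23 : pvStrip 2 3 = ([], 3) := by rw [pvStrip, dif_neg (by decide)]
      have f13 : pvFactB [2] 1 3 = [2] := by
        rw [pvFactB.eq_def, dif_neg (by decide), if_neg (by decide)]
      have f33 : pvFactB [] 3 3 = [3] := by
        rw [pvFactB.eq_def, dif_neg (by decide), if_pos (by decide)]
        rfl
      have hcase : n = 2 ∨ n = 3 := by omega
      rcases hcase with h | h <;> subst h
      · rw [pvFactA.eq_def, dif_neg (by decide), if_pos (by decide), s22, f13]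
        rfl
      · rw [pvFactA.eq_def, dif_neg (by decide), if_pos (by decide), s23, f33]
        rfl
  · rw [if_neg hn, pvFactA.eq_def, dif_neg (by nlinarith), if_neg (by omega)]

-- Every factor is ≥ 2.
theorem factA_ge_two (acc : List Int) (temp d : Int) (x : Int) (hacc : ∀ y ∈ acc, 2 ≤ y)
    (hx : x ∈ pvFactA acc temp d) : 2 ≤ x := by
  fun_induction pvFactA acc temp d with
  | case1 acc temp d h r ih =>
    refine ih ?_ hx
    intro y hy
    rcases List.mem_append.mp hy with h1 | h1
    · exact hacc y h1
    · obtain ⟨he, h2⟩ := pvStrip_mem d temp y h1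
      omega
  | case2 acc temp d h h1 =>
    rcases List.mem_append.mp hx with h1 | h1
    · exact hacc x h1
    · rcases List.mem_singleton.mp h1 with he
      omega
  | case3 acc temp d h h1 => exact hacc x hx

-- pvReinsert is orderedInsert.
theorem pvReinsert_eq (v : Int) (l : List Int) :
    pvReinsert v l = List.orderedInsert (· ≤ ·) v l := by
  induction l with
  | nil => rfl
  | cons b bs ih =>
    simp only [pvReinsert, List.orderedInsert]
    by_cases hb : b < v
    · rw [if_pos hb, if_neg (by omega), ih]
    · rw [if_neg hb, if_pos (by omega)]

-- One step: B's sorted-insert step tracks the sorted image of A's scan step.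
theorem step_corr (res : List Int) (f : Int) (hne : res ≠ []) :
    pvStepB (PySem.List.sorted res (fun x => x) false) f
      = PySem.List.sorted (pvStepA res f) (fun x => x) false
    ∧ pvStepA res f ≠ [] := by
  obtain ⟨m, hm⟩ : ∃ m, PySem.List.min? res (fun x => x) = some m := by
    cases hmm : PySem.List.min? res (fun x => x) with
    | none => exact absurd ((PySem.List.min?_eq_none_iff _ _).mp hmm) hne
    | some m => exact ⟨m, rfl⟩
  have hmem : m ∈ res := PySem.List.min?_mem hm
  obtain ⟨i, hi⟩ : ∃ i, PySem.List.index? res m = some i := by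
    cases hii : PySem.List.index? res m with
    | none => exact absurd hmem ((PySem.List.index?_eq_none_iff _ _).mp hii)
    | some i => exact ⟨i, rfl⟩
  obtain ⟨hilt, hresi, -⟩ := PySem.List.getElem_of_index?_eq_some hi
  have hstepA : pvStepA res f = res.modify i (· * f) := by
    unfold pvStepA
    rw [hm]
    simp only [hi]
  have hlen : (res.modify i (· * f)).length = res.length := List.length_modify ..
  have hne2 : pvStepA res f ≠ [] := by
    rw [hstepA]
    intro hc
    apply hne
    rw [← List.length_eq_zero_iff] at hc ⊢
    omega
  refine ⟨?_, hne2⟩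
  obtain ⟨m', t, hsort⟩ : ∃ m' t, PySem.List.sorted res (fun x => x) false = m' :: t := by
    cases hs : PySem.List.sorted res (fun x => x) false with
    | nil => exact absurd ((PySem.List.sorted_eq_nil_iff _ _ _).mp hs) hne
    | cons a b => exact ⟨a, b, rfl⟩
  have hperm : (PySem.List.sorted res (fun x => x) false).Perm res :=
    PySem.List.sorted_perm res (fun x => x) false
  have hm'mem : m' ∈ res := hperm.mem_iff.mp (by simp [hsort])
  have hm'min : ∀ y ∈ res, m' ≤ y := PySem.List.key_head_sorted_le res (fun x => x) hsort
  have hmmin : ∀ y ∈ res, m ≤ y := PySem.List.min?_isMin hm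
  have hmm' : m' = m := le_antisymm (hm'min m hmem) (hmmin m' hm'mem)
  have hstepB : pvStepB (PySem.List.sorted res (fun x => x) false) f = pvReinsert (m * f) t := by
    rw [hsort, hmm']
    rfl
  rw [hstepB, hstepA]
  have hmod : res.modify i (· * f) = res.set i (m * f) := by
    rw [List.modify_eq_set]
    congr 1
    simp [List.getElem?_eq_getElem hilt, hresi]
  -- the permutation chain
  have hidx : List.idxOf? m res = some i := by
    rw [← PySem.List.index?_eq_idxOf?]
    exact hi
  have herase : res.erase m = res.eraseIdx i := by
    rw [List.erase_eq_eraseIdx, hidx]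
  have hrest : (res.erase m).Perm t := by
    have h1 : res.Perm (m :: t) := by
      have := hperm.symm
      rw [hsort, hmm'] at this
      exact this
    have h2 := h1.erase m
    rwa [List.erase_cons_head] at h2
  have p1 : (pvReinsert (m * f) t).Perm ((m * f) :: t) := by
    rw [pvReinsert_eq]
    exact List.perm_orderedInsert _ _ _
  have p2 : ((m * f) :: t).Perm ((m * f) :: res.eraseIdx i) := by
    rw [← herase]
    exact hrest.symm.cons _
  have p3 : (res.set i (m * f)).Perm ((m * f) :: res.eraseIdx i) :=
    List.set_perm_cons_eraseIdx hilt _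
  have hpermfin : (pvReinsert (m * f) t).Perm (res.modify i (· * f)) := by
    rw [hmod]
    exact (p1.trans p2).trans p3.symm
  have htpw : List.Pairwise (fun a b : Int => a ≤ b) t := by
    have := PySem.List.sorted_pairwise res (fun x => x)
    rw [hsort] at this
    exact (List.pairwise_cons.mp this).2
  have hpw : List.Pairwise (fun a b : Int => a ≤ b) (pvReinsert (m * f) t) := by
    rw [pvReinsert_eq]
    exact List.Pairwise.orderedInsert _ _ htpw
  exact (PySem.List.sorted_id_eq_of_perm_of_pairwise _ _ hpermfin hpw).symm

-- Whole fold.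
theorem fold_corr (fs : List Int) (res : List Int) (hne : res ≠ []) :
    fs.foldl pvStepB (PySem.List.sorted res (fun x => x) false)
      = PySem.List.sorted (fs.foldl pvStepA res) (fun x => x) false := by
  induction fs generalizing res with
  | nil => simp
  | cons f fs ih =>
    simp only [List.foldl_cons]
    obtain ⟨h1, h2⟩ := step_corr res f hne
    rw [h1, ih _ h2]

-- A factor 1 is a no-op for A's step.
theorem stepA_one (res : List Int) : pvStepA res 1 = res := by
  unfold pvStepA
  cases hm : PySem.List.min? res (fun x => x) with
  | none => rfl
  | some m =>
    simp only []
    cases hi : PySem.List.index? res m with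
    | none => rfl
    | some i =>
      simp only [mul_one]
      exact List.modify_id i res

-- Descending sort of factors followed by padding ones splits off the ones.
theorem sortedRev_append_ones (F : List Int) (p : Nat) (hF : ∀ x ∈ F, 2 ≤ x) :
    PySem.List.sorted (F ++ List.replicate p 1) (fun x => x) true
      = PySem.List.sorted F (fun x => x) true ++ List.replicate p 1 := by
  apply List.Perm.eq_of_pairwise (le := fun a b : Int => b ≤ a)
  · intro a b _ _ h1 h2
    omega
  · exact PySem.List.sorted_pairwise_rev _ _
  · rw [List.pairwise_append]
    refine ⟨PySem.List.sorted_pairwise_rev _ _, ?_, ?_⟩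
    · exact List.pairwise_replicate.mpr (Or.inr le_rfl)
    · intro x hx y hy
      have hx2 : 2 ≤ x := hF x ((PySem.List.sorted_perm F (fun x => x) true).mem_iff.mp hx)
      have hy1 : y = 1 := List.eq_of_mem_replicate hy
      omega
  · exact (PySem.List.sorted_perm _ _ _).trans
      (((PySem.List.sorted_perm F (fun x => x) true).symm.append_right _).symm.symm)

-- ===== VERDICT (by name: the statement is the Claim_ definition above) =====
theorem minDifferenceClaude_spec : Claim_equal_minDifferenceClaude := by
  intro n k _ hpre
  unfold Spec_minDifferenceClaude minDifferenceClaude minDifferenceClaude_alt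
  rw [← factors_eq n]
  by_cases hk : 1 ≤ k
  · have hRne : List.replicate k.toNat (1 : Int) ≠ [] := by
      simp only [ne_eq, List.replicate_eq_nil_iff]
      omega
    have hsortR : PySem.List.sorted (List.replicate k.toNat (1 : Int)) (fun x => x) false
        = List.replicate k.toNat 1 :=
      PySem.List.sorted_eq_self_of_pairwise _ _ (List.pairwise_replicate.mpr (Or.inr le_rfl))
    have hfold := fold_corr (PySem.List.sorted (pvFactA [] n 2) (fun x => x) true)
      (List.replicate k.toNat 1) hRne
    rw [hsortR] at hfold
    rw [sortedRev_append_ones (pvFactA [] n 2) _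
        (fun x hx => factA_ge_two [] n 2 x (by simp) hx),
      List.foldl_append]
    have hones : ∀ (p : Nat) (r : List Int), (List.replicate p (1 : Int)).foldl pvStepA r = r := by
      intro p
      induction p with
      | zero => intro r; rfl
      | succ q ihq =>
        intro r
        rw [List.replicate_succ, List.foldl_cons, stepA_one]
        exact ihq r
    rw [hones]
    exact hfold.symm
  · have hn : n ≤ 1 := by
      rcases hpre with h | h
      · exact h
      · omega
    have hF0 : pvFactA [] n 2 = [] := by
      rw [pvFactA.eq_def, dif_neg (by nlinarith), if_neg (by omega)]
    have hkt : k.toNat = 0 := by omega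
    simp [hF0, hkt, PySem.List.sorted]
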